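-- pv_equiv track=rewrite | github.com/mariancosmin17/ProiectAi2025 | proiect-smartest-ai/server/app/nash/logic.py | _best_responses
-- ===== SOURCE A (Python) =====
-- from typing import List, Tuple
--
-- def _best_responses(payoffs: List[List[int]], by_row: bool) -> List[Tuple[int, int]]:
--     res: List[Tuple[int, int]] = []
--     rows, cols = len(payoffs), len(payoffs[0])
--     if by_row:  # Jucătorul 2: max pe rând
--         for r in range(rows):
--             m = max(payoffs[r])
--             for c in range(cols):
--                 if payoffs[r][c] == m:
--                     res.append((r, c))
--     else:       # Jucătorul 1: max pe coloană
--         for c in range(cols):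
--             col_vals = [payoffs[r][c] for r in range(rows)]
--             m = max(col_vals)
--             for r in range(rows):
--                 if payoffs[r][c] == m:
--                     res.append((r, c))
--     return res
-- ===== SOURCE B (Python) =====
-- from typing import List, Tuple
--
-- def _best_responses(payoffs: List[List[int]], by_row: bool) -> List[Tuple[int, int]]:
--     # Single pass per row / row-major pass over the matrix, maintaining the
--     # running maximum together with the live list of tying indices.
--     if by_row:
--         res: List[Tuple[int, int]] = []
--         for r, row in enumerate(payoffs):
--             best, ties = row[0], [0]
--             for c, v in enumerate(row[1:], start=1):
--                 if v > best:
--                     best, ties = v, [c]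
--                 elif v == best:
--                     ties.append(c)
--             res.extend((r, c) for c in ties)
--         return res
--     else:
--         state = [(v, [0]) for v in payoffs[0]]
--         for r, row in enumerate(payoffs[1:], start=1):
--             state = [
--                 (v, [r]) if v > best else (best, ties + [r]) if v == best else (best, ties)
--                 for (best, ties), v in zip(state, row)
--             ]
--         return [(r, c) for c, (_, ties) in enumerate(state) for r in ties]
-- ===== Notes on version B (the rewrite author's own statement) =====
-- stated objective: alternative
-- what changed: Replaces A's two-pass per line (compute the max, then rescan to collect the argmax indices) with a single pass that maintains the running maximum together with the live tie list; the column case becomes one row-major sweep updating per-column (best, ties) states instead of materialising each column and scanning it twice.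
-- outside the precondition, e.g. on _best_responses([[1], [2, 3]], True): A returns [(0, 0)], B returns [(0, 0), (1, 1)]
import Mathlib
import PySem

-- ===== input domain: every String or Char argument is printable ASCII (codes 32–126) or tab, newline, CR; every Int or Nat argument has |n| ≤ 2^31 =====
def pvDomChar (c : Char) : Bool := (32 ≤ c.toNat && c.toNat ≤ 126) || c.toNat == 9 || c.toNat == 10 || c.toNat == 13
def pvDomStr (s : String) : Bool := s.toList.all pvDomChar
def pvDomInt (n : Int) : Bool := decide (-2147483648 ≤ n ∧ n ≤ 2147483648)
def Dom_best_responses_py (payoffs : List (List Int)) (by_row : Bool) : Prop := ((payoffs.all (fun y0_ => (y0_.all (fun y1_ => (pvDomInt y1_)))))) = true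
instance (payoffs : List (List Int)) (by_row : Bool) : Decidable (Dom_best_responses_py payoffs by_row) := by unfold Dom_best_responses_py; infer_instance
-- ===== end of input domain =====

-- B replaces A's two-pass "compute max then rescan" per row/column by a single pass
-- maintaining the running maximum and the live tie list (row-major sweep in the column case);
-- alternative decomposition, same asymptotic cost.


-- ===== PORT A =====
def best_responses_py (payoffs : List (List Int)) (by_row : Bool) : List (Int × Int) :=
  let rows : Int := payoffs.length
  let cols : Int := (PySem.List.pyGetD payoffs 0 []).length
  if by_row then
    (PySem.List.pyRange 0 rows 1).foldl (fun res r =>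
      let rowr := PySem.List.pyGetD payoffs r []
      let m := (PySem.List.max? rowr (fun x => x)).getD 0
      (PySem.List.pyRange 0 cols 1).foldl (fun res c =>
        if PySem.List.pyGetD rowr c 0 = m then res ++ [(r, c)] else res) res) []
  else
    (PySem.List.pyRange 0 cols 1).foldl (fun res c =>
      let col_vals := (PySem.List.pyRange 0 rows 1).map
        (fun r => PySem.List.pyGetD (PySem.List.pyGetD payoffs r []) c 0)
      let m := (PySem.List.max? col_vals (fun x => x)).getD 0
      (PySem.List.pyRange 0 rows 1).foldl (fun res r =>
        if PySem.List.pyGetD (PySem.List.pyGetD payoffs r []) c 0 = m then res ++ [(r, c)] else res) res) []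

-- ===== PORT B =====
-- B's per-element update: new value v at index i against (best, ties)
def brScan (bt : Int × List Int) (p : Int × Int) : Int × List Int :=
  if p.2 > bt.1 then (p.2, [p.1])
  else if p.2 = bt.1 then (bt.1, bt.2 ++ [p.1])
  else bt

def best_responses_py_alt (payoffs : List (List Int)) (by_row : Bool) : List (Int × Int) :=
  if by_row then
    (PySem.List.enumerate payoffs 0).foldl (fun res p =>
      let bt := (PySem.List.enumerate (PySem.List.slice p.2 (some 1) none) 1).foldl
        brScan (PySem.List.pyGetD p.2 0 0, [0])
      res ++ bt.2.map (fun c => (p.1, c))) []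
  else
    let init := (PySem.List.pyGetD payoffs 0 []).map (fun v => (v, [(0 : Int)]))
    let state := (PySem.List.enumerate (PySem.List.slice payoffs (some 1) none) 1).foldl
      (fun st p => (st.zip p.2).map (fun q => brScan q.1 (p.1, q.2))) init
    (PySem.List.enumerate state 0).foldl (fun res p =>
      res ++ p.2.2.map (fun r => (r, p.1))) []

-- ===== PRECONDITION & SPEC =====
-- Pre_ excludes the empty matrix (A raises IndexError), rows shorter than the first row
-- (A raises IndexError while scanning), and, in the by_row case, zero-width rows (A raises
-- ValueError from max([])) and rows longer than the first: on those ragged inputs A's value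
-- mixes the full row's max with the first row's width — an implementation artefact on inputs
-- outside the function's natural (rectangular) domain, which B does not reproduce.
def Pre_best_responses_py (payoffs : List (List Int)) (by_row : Bool) : Prop :=
  payoffs ≠ [] ∧
  (by_row = true → (∀ row ∈ payoffs, row.length = (payoffs.headD []).length) ∧ payoffs.headD [] ≠ []) ∧
  (by_row = false → ∀ row ∈ payoffs, (payoffs.headD []).length ≤ row.length)
instance (payoffs : List (List Int)) (by_row : Bool) : Decidable (Pre_best_responses_py payoffs by_row) := by
  unfold Pre_best_responses_py; infer_instance

def pvWitness_best_responses_py : List (List Int) × Bool := ([[1, 2], [2, 0]], true)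

def Spec_best_responses_py (payoffs : List (List Int)) (by_row : Bool) (out : List (Int × Int)) : Prop := out = best_responses_py_alt payoffs by_row
instance (payoffs : List (List Int)) (by_row : Bool) (out : List (Int × Int)) : Decidable (Spec_best_responses_py payoffs by_row out) := by unfold Spec_best_responses_py; infer_instance

-- ===== CLAIM (what is proved, stated in full; the proofs are below) =====
def Claim_equal_best_responses_py : Prop := ∀ (payoffs : List (List Int)) (by_row : Bool), Dom_best_responses_py payoffs by_row → Pre_best_responses_py payoffs by_row → Spec_best_responses_py payoffs by_row (best_responses_py payoffs by_row)

-- ===== LEMMAS AND PROOFS =====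

-- characterisation of B's one-pass scan: running max plus tie list
theorem brScan_spec (l : List Int) : ∀ (j b : Int) (ts : List Int),
    (PySem.List.enumerate l j).foldl brScan (b, ts)
    = (l.foldl max b,
       (if l.foldl max b = b then ts else [])
         ++ ((PySem.List.enumerate l j).filter (fun p => p.2 = l.foldl max b)).map (fun p => p.1)) := by
  induction l with
  | nil => intro j b ts; simp [PySem.List.enumerate_nil]
  | cons v t ih =>
    intro j b ts
    have hle : max b v ≤ t.foldl max (max b v) := (PySem.List.le_foldl_max t (max b v)).1
    rw [PySem.List.enumerate_cons]
    simp only [List.foldl_cons, List.filter_cons]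
    by_cases hgt : v > b
    · have hbv : max b v = v := by omega
      rw [show brScan (b, ts) (j, v) = (v, [j]) from by simp [brScan, hgt]]
      rw [ih (j+1) v [j]]
      have hMb : ¬ t.foldl max v = b := by rw [hbv] at hle; omega
      simp only [hbv, hMb, if_false]
      split_ifs with h1 h2 h3
      · simp
      · exact absurd h1.symm (by simpa using h2)
      · exact absurd (show v = t.foldl max v from by simpa using h3).symm h1
      · simp
    · by_cases heq : v = b
      · have hbv : max b v = b := by omega
        rw [show brScan (b, ts) (j, v) = (b, ts ++ [j]) from by simp [brScan, heq]]
        rw [ih (j+1) b (ts ++ [j])]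
        subst heq
        simp only [hbv]
        split_ifs with h1 h2 h3
        · simp
        · exact absurd h1.symm (by simpa using h2)
        · exact absurd (show v = t.foldl max v from by simpa using h3).symm h1
        · simp
      · have hlt : v < b := by omega
        have hbv : max b v = b := by omega
        rw [show brScan (b, ts) (j, v) = (b, ts) from by simp [brScan, hgt, heq]]
        rw [ih (j+1) b ts]
        have hvM : ¬ v = t.foldl max b := by
          have := (PySem.List.le_foldl_max t b).1; omega
        simp [hbv, hvM]

-- A's "scan indices, append where xs[i] = m" loop, as a filtered enumeration
theorem fold_filter_enum {α : Type} (xs : List Int) (p : Int → Bool) (g : Int → α) (init : List α) :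
    (PySem.List.pyRange 0 (xs.length : Int) 1).foldl
      (fun res i => if p (PySem.List.pyGetD xs i 0) then res ++ [g i] else res) init
    = init ++ ((PySem.List.enumerate xs 0).filter (fun q => p q.2)).map (fun q => g q.1) := by
  rw [PySem.List.foldl_append_if (fun i => p (PySem.List.pyGetD xs i 0)) g]
  rw [PySem.List.enumerate_eq_map_pyRange (d := 0), List.filter_map, List.map_map]
  rfl

-- B's one-pass result over a nonempty list equals "indices where the value is the max"
theorem onepass_eq_argmax (x : Int) (t : List Int) :
    ((PySem.List.enumerate t 1).foldl brScan (x, [0])).2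
    = ((PySem.List.enumerate (x :: t) 0).filter
        (fun q => q.2 = ((PySem.List.max? (x :: t) (fun y => y)).getD 0))).map (fun q => q.1) := by
  rw [brScan_spec t 1 x [0], PySem.List.max?_id_cons]
  rw [PySem.List.enumerate_cons, List.filter_cons]
  simp only [Option.getD_some]
  by_cases hM : t.foldl max x = x
  · have : (x = t.foldl max x) = True := by simp [hM]
    simp [hM]
  · have : ¬ x = t.foldl max x := fun h => hM h.symm
    simp only [hM, this, if_false, List.nil_append]
    rfl

-- the column fold of B, reduced to independent per-column one-pass scans
theorem colfold (rows : List (List Int)) : ∀ (st : List (Int × List Int)) (j : Int),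
    (∀ row ∈ rows, st.length ≤ row.length) →
    (PySem.List.enumerate rows j).foldl
      (fun st p => (st.zip p.2).map (fun q => brScan q.1 (p.1, q.2))) st
    = (PySem.List.enumerate st 0).map (fun q =>
        (PySem.List.enumerate (rows.map (fun row => PySem.List.pyGetD row q.1 0)) j).foldl brScan q.2) := by
  induction rows with
  | nil =>
    intro st j _
    simp only [PySem.List.enumerate_nil, List.foldl_nil, List.map_nil]
    have := PySem.List.map_snd_enumerate st (0 : Int)
    conv_lhs => rw [← this]
  | cons row rest ih =>
    intro st j hlen
    rw [PySem.List.enumerate_cons]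
    simp only [List.foldl_cons]
    rw [ih ((st.zip row).map (fun q => brScan q.1 (j, q.2))) (j+1)
        (by intro r hr
            have h1 : st.length ≤ row.length := hlen row (by simp)
            have := hlen r (by simp [hr])
            simp [List.length_zip]; omega)]
    apply List.ext_getElem
    · simp [PySem.List.length_enumerate, List.length_zip]
      have h1 : st.length ≤ row.length := hlen row (by simp)
      omega
    · intro k hk1 hk2
      have hst : k < st.length := by
        simp [PySem.List.length_enumerate] at hk2; omega
      have hrow : k < row.length := lt_of_lt_of_le hst (hlen row (by simp))
      simp only [List.getElem_map, PySem.List.getElem_enumerate]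
      simp only [List.getElem_zip, List.map_cons]
      rw [PySem.List.enumerate_cons]
      simp only [List.foldl_cons]
      have hget : PySem.List.pyGetD row ((0 : Int) + (k : Int)) 0 = row[k] := by
        have : (0 : Int) + (k : Int) = ((k : Nat) : Int) := by omega
        rw [this, PySem.List.pyGetD_natCast]
        simp [List.getD_eq_getElem?_getD, hrow]
      rw [hget]

-- A's "find max, rescan appending g i where xs[i] = max" equals B's one-pass scan, for xs ≠ []
theorem argmax_fold_eq {α : Type} (g : Int → α) (row : List Int) (hrow : row ≠ []) (res : List α) :
    (PySem.List.pyRange 0 (row.length : Int) 1).foldl (fun res i =>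
       if PySem.List.pyGetD row i 0 = (PySem.List.max? row (fun x => x)).getD 0
       then res ++ [g i] else res) res
    = res ++ ((PySem.List.enumerate (PySem.List.slice row (some 1) none) 1).foldl
        brScan (PySem.List.pyGetD row 0 0, [0])).2.map g := by
  obtain ⟨x, t, rfl⟩ : ∃ x t, row = x :: t := by
    cases row with
    | nil => exact absurd rfl hrow
    | cons a b => exact ⟨a, b, rfl⟩
  rw [PySem.List.slice_from_one]
  simp only [List.tail_cons]
  rw [show PySem.List.pyGetD (x :: t) 0 0 = x from PySem.List.pyGetD_zero_cons x t 0]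
  rw [onepass_eq_argmax x t]
  have h := fold_filter_enum (x :: t)
      (fun v => decide (v = (PySem.List.max? (x :: t) (fun y => y)).getD 0)) g res
  simp only [decide_eq_true_eq] at h
  rw [h, List.map_map]
  rfl

-- ===== VERDICT (by name: the statement is the Claim_ definition above) =====
theorem best_responses_py_spec : Claim_equal_best_responses_py := by
  intro payoffs by_row _hdom hpre
  obtain ⟨hne, hT, hF⟩ := hpre
  unfold Spec_best_responses_py
  obtain ⟨row0, rest, rfl⟩ : ∃ a l, payoffs = a :: l := by
    cases payoffs with
    | nil => exact absurd rfl hne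
    | cons a l => exact ⟨a, l, rfl⟩
  simp only [List.headD_cons] at hT hF
  unfold best_responses_py best_responses_py_alt
  cases by_row with
  | true =>
    have hrect : ∀ row ∈ row0 :: rest, row.length = row0.length := (hT rfl).1
    have hw : row0 ≠ [] := (hT rfl).2
    simp only [if_true, PySem.List.pyGetD_zero_cons]
    rw [PySem.List.enumerate_eq_map_pyRange (d := ([] : List Int)), List.foldl_map]
    simp only [PySem.List.len_eq]
    apply PySem.List.foldl_congr_mem
    intro res r hr
    rw [PySem.List.mem_pyRange_one] at hr
    have hget : PySem.List.pyGetD (row0 :: rest) r [] = (row0 :: rest)[r.toNat]'(by omega) := by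
      rw [PySem.List.pyGetD_eq_getElem _ _ hr.1 (by exact_mod_cast hr.2)]
    have hmem : PySem.List.pyGetD (row0 :: rest) r [] ∈ row0 :: rest := by
      rw [hget]; exact List.getElem_mem _
    have hlen : (PySem.List.pyGetD (row0 :: rest) r []).length = row0.length := hrect _ hmem
    have hner : PySem.List.pyGetD (row0 :: rest) r [] ≠ [] := by
      intro h; apply hw
      rw [h] at hlen
      exact List.length_eq_zero_iff.mp hlen.symm
    rw [show ((row0.length : Int)) = ((PySem.List.pyGetD (row0 :: rest) r []).length : Int) by
      rw [hlen]]
    exact argmax_fold_eq (fun c => (r, c)) _ hner res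
  | false =>
    simp only [Bool.false_eq_true, if_false, PySem.List.pyGetD_zero_cons,
      PySem.List.slice_from_one, List.tail_cons]
    rw [colfold rest (row0.map (fun v => (v, [(0 : Int)]))) 1 (by
      intro row hrowm
      simpa using hF rfl row (List.mem_cons_of_mem _ hrowm))]
    rw [PySem.List.enumerate_eq_map_pyRange (d := ((0 : Int), ([] : List Int))), List.foldl_map]
    simp only [PySem.List.len_eq, List.length_map, PySem.List.length_enumerate]
    apply PySem.List.foldl_congr_mem
    intro res c hc
    rw [PySem.List.mem_pyRange_one] at hc
    have hcn : c.toNat < row0.length := by omega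
    -- A's col_vals is the c-th column of the matrix
    have hcols : (PySem.List.pyRange 0 (((row0 :: rest).length : Nat) : Int) 1).map
        (fun r => PySem.List.pyGetD (PySem.List.pyGetD (row0 :: rest) r []) c 0)
        = (row0 :: rest).map (fun row => PySem.List.pyGetD row c 0) := by
      rw [show (fun r => PySem.List.pyGetD (PySem.List.pyGetD (row0 :: rest) r []) c 0)
          = (fun row => PySem.List.pyGetD row c 0) ∘ (fun r => PySem.List.pyGetD (row0 :: rest) r [])
          from rfl]
      rw [← List.map_map, PySem.List.map_pyGetD_pyRange_zero']
    rw [hcols]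
    -- the inner scan reads the same column values
    rw [PySem.List.foldl_congr_mem (PySem.List.pyRange 0 (((row0 :: rest).length : Nat) : Int) 1)
      _ (fun res r => if PySem.List.pyGetD ((row0 :: rest).map (fun row => PySem.List.pyGetD row c 0)) r 0
            = (PySem.List.max? ((row0 :: rest).map (fun row => PySem.List.pyGetD row c 0)) (fun x => x)).getD 0
          then res ++ [(r, c)] else res) res
      (by
        intro acc r hr
        rw [PySem.List.mem_pyRange_one] at hr
        have hrn : r.toNat < (row0 :: rest).length := by omega
        have h1 : PySem.List.pyGetD (row0 :: rest) r [] = (row0 :: rest)[r.toNat] := by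
          rw [PySem.List.pyGetD_eq_getElem _ _ hr.1 (by exact_mod_cast hr.2)]
        have h2 : PySem.List.pyGetD ((row0 :: rest).map (fun row => PySem.List.pyGetD row c 0)) r 0
            = PySem.List.pyGetD ((row0 :: rest)[r.toNat]) c 0 := by
          rw [PySem.List.pyGetD_eq_getElem _ _ hr.1 (by rw [List.length_map]; exact hr.2)]
          rw [List.getElem_map]
        dsimp only
        rw [h1, h2])]
    -- apply the one-pass characterisation to the column
    have hlen2 : (((row0 :: rest).length : Nat) : Int)
        = ((((row0 :: rest).map (fun row => PySem.List.pyGetD row c 0)).length : Nat) : Int) := by simp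
    rw [hlen2, argmax_fold_eq (fun r => (r, c))
      ((row0 :: rest).map (fun row => PySem.List.pyGetD row c 0)) (by simp) res]
    simp only [List.map_cons, PySem.List.slice_from_one, List.tail_cons, PySem.List.pyGetD_zero_cons]
    -- B's state entry at column c
    have hstate : PySem.List.pyGetD
        (List.map (fun q => List.foldl brScan q.2
            (PySem.List.enumerate (List.map (fun row => PySem.List.pyGetD row q.1 0) rest) 1))
          (PySem.List.enumerate (List.map (fun v => (v, ([(0 : Int)] : List Int))) row0)))
        c ((0 : Int), ([] : List Int))
        = List.foldl brScan (row0[c.toNat], [(0 : Int)])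
            (PySem.List.enumerate (List.map (fun row => PySem.List.pyGetD row c 0) rest) 1) := by
      rw [PySem.List.pyGetD_eq_getElem _ _ hc.1 (by simp; exact_mod_cast hc.2)]
      simp only [List.getElem_map]
      rw [PySem.List.getElem_enumerate _ _ _ (by simp [PySem.List.length_enumerate]; exact hcn)]
      simp only [List.getElem_map]
      have hidx : (0 : Int) + (c.toNat : Int) = c := by omega
      rw [hidx]
    rw [hstate]
    have hx0 : PySem.List.pyGetD row0 c 0 = row0[c.toNat] := by
      rw [PySem.List.pyGetD_eq_getElem _ _ hc.1 (by exact_mod_cast hc.2)]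
    rw [hx0]
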